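-- pv_equiv track=rewrite | github.com/AgustinCavo/guia_buch_tda | guia_buch_tda/div_y_conquista/ej2.py | finder_zero_rec
-- ===== SOURCE A (Python) =====
-- def finder_zero_rec(vec,n):
--     if len(vec)==1:
--         if vec[0]==0:
--             return 0+n-1
--         else:
--             return -1
--
--     izq=vec[0:n//2]
--     der=vec[n//2:n]
--     resu_izq=finder_zero_rec(izq,n//2)
--     resu_der=finder_zero_rec(der,n-n//2)
--
--     if resu_izq != -1:
--         return resu_izq
--     if resu_der != -1:
--         return resu_der + n//2
--
--     return -1
-- ===== SOURCE B (Python) =====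
-- def finder_zero_rec(vec, n):
--     for i, x in enumerate(vec[:n]):
--         if x == 0:
--             return i
--     return -1
-- ===== Notes on version B (the rewrite author's own statement) =====
-- stated objective: faster
-- what changed: Replaces the divide-and-conquer recursion (which slices the vector and recombines half-results) by a single left-to-right scan of vec[:n] returning the index of the first zero.
-- intended difference: On a one-element vector [0] with n not in {0, 1}, A's base case returns n-1 computed from the caller-supplied n (e.g. 2 for ([0], 3)); B returns the position of the zero inside the window vec[:n] (0 for n >= 2, -1 for n < 0 where the window is empty), which is the intended answer. — e.g. on finder_zero_rec([0], 3): A returns 2, B returns 0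
-- outside the precondition, e.g. on finder_zero_rec([1, 0], 3): A returns 2, B returns 1; on finder_zero_rec([1, 2], 4): A raises RecursionError, B returns -1
import Mathlib
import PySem

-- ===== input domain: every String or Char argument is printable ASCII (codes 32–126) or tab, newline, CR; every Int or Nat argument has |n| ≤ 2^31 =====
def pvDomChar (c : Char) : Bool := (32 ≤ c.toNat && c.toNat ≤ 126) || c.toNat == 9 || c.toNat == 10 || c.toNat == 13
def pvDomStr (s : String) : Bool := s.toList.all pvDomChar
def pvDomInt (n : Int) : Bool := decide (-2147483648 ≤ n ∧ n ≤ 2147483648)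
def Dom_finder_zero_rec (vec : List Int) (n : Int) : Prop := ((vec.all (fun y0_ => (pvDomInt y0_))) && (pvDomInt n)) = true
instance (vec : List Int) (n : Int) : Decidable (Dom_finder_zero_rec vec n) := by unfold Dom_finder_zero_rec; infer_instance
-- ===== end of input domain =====

-- B replaces A's slice-and-recombine divide-and-conquer by one linear scan of vec[:n] for the first zero (objective: faster).

-- ===== PORT A =====
-- A recurses on slices; the Python diverges (RecursionError) when n disagrees with len(vec)
-- (e.g. vec=[1,2], n=4, where a slice reproduces the whole vector), so the port carries a fuel
-- counter, vec.length + n.natAbs + 1, which is never exhausted on Pre_-admitted inputs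
-- (recursion depth ≤ vec.length there, see pvFindA_eq / pvFindA_take below).
def pvFindA : Nat → List Int → Int → Int
  | 0, _, _ => -1
  | fuel + 1, vec, n =>
    if vec.length = 1 then
      if PySem.List.pyGetD vec 0 0 = 0 then 0 + n - 1 else -1
    else
      let izq := PySem.List.slice vec (some 0) (some (PySem.Int.floordiv n 2))
      let der := PySem.List.slice vec (some (PySem.Int.floordiv n 2)) (some n)
      let resu_izq := pvFindA fuel izq (PySem.Int.floordiv n 2)
      let resu_der := pvFindA fuel der (n - PySem.Int.floordiv n 2)
      if resu_izq ≠ -1 then resu_izq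
      else if resu_der ≠ -1 then resu_der + PySem.Int.floordiv n 2
      else -1

def finder_zero_rec (vec : List Int) (n : Int) : Int :=
  pvFindA (vec.length + n.natAbs + 1) vec n

-- ===== PORT B =====
def pvScanB : List Int → Int → Int
  | [], _ => -1
  | x :: xs, i => if x = 0 then i else pvScanB xs (i + 1)

def finder_zero_rec_alt (vec : List Int) (n : Int) : Int :=
  pvScanB (PySem.List.slice vec none (some n)) 0

-- ===== PRECONDITION & SPEC =====
-- Pre_ excludes the empty vector and, for vectors of length ≥ 2, every n outside [2, len(vec)]:
-- there the Python A almost always diverges with RecursionError (n ≤ 1 makes a slice empty,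
-- n > len makes a slice reproduce the whole vector), and on the scattered n > len inputs where
-- clamping happens to stop the recursion the returned index is computed from the mismatched n,
-- an accident of the slicing (cites: ([1,0], 3) → A returns 2, B returns 1; ([1,2], 4) → A
-- raises RecursionError, B returns -1). One-element vectors are admitted for every n.
def Pre_finder_zero_rec (vec : List Int) (n : Int) : Prop :=
  vec.length = 1 ∨ (2 ≤ n ∧ n ≤ (vec.length : Int))
instance (vec : List Int) (n : Int) : Decidable (Pre_finder_zero_rec vec n) := by
  unfold Pre_finder_zero_rec; infer_instance

def pvWitness_finder_zero_rec : List Int × Int := ([3, 0, 5], 3)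

-- On a one-element vector [0] with n ∉ {0, 1}, A's base case returns n-1 computed from the
-- caller-supplied n; B returns the position of the zero inside the window vec[:n]
-- (0 for n ≥ 2, -1 for n < 0 where the window is empty), which is the intended answer.
def D_finder_zero_rec (vec : List Int) (n : Int) : Prop :=
  vec.length = 1 ∧ vec.headI = 0 ∧ n ≠ 1 ∧ n ≠ 0
instance (vec : List Int) (n : Int) : Decidable (D_finder_zero_rec vec n) := by
  unfold D_finder_zero_rec; infer_instance

def Spec_finder_zero_rec (vec : List Int) (n : Int) (out : Int) : Prop :=
  ¬ D_finder_zero_rec vec n → out = finder_zero_rec_alt vec n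
instance (vec : List Int) (n : Int) (out : Int) : Decidable (Spec_finder_zero_rec vec n out) := by
  unfold Spec_finder_zero_rec; infer_instance

def pvDiffWitness_finder_zero_rec : List Int × Int := ([0], 3)
def pvDiffWitnessOut_finder_zero_rec : Int × Int := (2, 0)

-- ===== CLAIM (what is proved, stated in full; the proofs are below) =====
def Claim_unchanged_finder_zero_rec : Prop := ∀ (vec : List Int) (n : Int), Dom_finder_zero_rec vec n → Pre_finder_zero_rec vec n → Spec_finder_zero_rec vec n (finder_zero_rec vec n)
def Claim_changed_finder_zero_rec : Prop := Dom_finder_zero_rec (pvDiffWitness_finder_zero_rec.1) (pvDiffWitness_finder_zero_rec.2) ∧ Pre_finder_zero_rec (pvDiffWitness_finder_zero_rec.1) (pvDiffWitness_finder_zero_rec.2) ∧ D_finder_zero_rec (pvDiffWitness_finder_zero_rec.1) (pvDiffWitness_finder_zero_rec.2) ∧ finder_zero_rec (pvDiffWitness_finder_zero_rec.1) (pvDiffWitness_finder_zero_rec.2) = pvDiffWitnessOut_finder_zero_rec.1 ∧ finder_zero_rec_alt (pvDiffWitness_finder_zero_rec.1) (pvDiffWitness_finder_zero_rec.2) = pvDiffWitnessOut_finder_zero_rec.2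 ∧ pvDiffWitnessOut_finder_zero_rec.1 ≠ pvDiffWitnessOut_finder_zero_rec.2
def Claim_exact_finder_zero_rec : Prop := ∀ (vec : List Int) (n : Int), Dom_finder_zero_rec vec n → Pre_finder_zero_rec vec n → D_finder_zero_rec vec n → finder_zero_rec vec n ≠ finder_zero_rec_alt vec n

-- ===== LEMMAS AND PROOFS =====

-- B's scan equals the first index of a zero (shifted by the accumulator), or -1.
theorem pvScanB_eq (vec : List Int) (i : Int) :
    pvScanB vec i = (match vec.findIdx? (· == 0) with
      | some k => i + (k : Int)
      | none => -1) := by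
  induction vec generalizing i with
  | nil => simp [pvScanB]
  | cons x xs ih =>
    by_cases hx : x = 0
    · simp [pvScanB, hx, List.findIdx?_cons]
    · simp only [pvScanB, if_neg hx, ih, List.findIdx?_cons,
        show ((x == 0) = false) by simp [hx]]
      cases h : xs.findIdx? (· == 0) with
      | none => simp
      | some k => simp [Option.map_some]; ring

-- A, called with n = len(vec) (the invariant its recursion maintains below the top call),
-- computes the first index of a zero, or -1.
theorem pvFindA_eq (fuel : Nat) : ∀ (vec : List Int), vec ≠ [] → vec.length ≤ fuel →
    pvFindA fuel vec (vec.length : Int) = (match vec.findIdx? (· == 0) with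
      | some k => (k : Int)
      | none => -1) := by
  induction fuel with
  | zero =>
    intro vec hne hle
    exact absurd (List.length_eq_zero_iff.mp (Nat.le_zero.mp hle)) hne
  | succ fuel ih =>
    intro vec hne hle
    by_cases h1 : vec.length = 1
    · obtain ⟨x, rfl⟩ : ∃ x, vec = [x] := List.length_eq_one_iff.mp h1
      by_cases hx : x = 0
      · simp [pvFindA, hx, List.findIdx?_cons, PySem.List.pyGetD]
      · simp [pvFindA, hx, List.findIdx?_cons, PySem.List.pyGetD]
    · -- vec.length ≥ 2
      set L := vec.length with hL
      have hL0 : 0 < L := List.length_pos_iff.mpr hne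
      have hL2 : 2 ≤ L := by omega
      set m := L / 2 with hm
      have hm1 : 1 ≤ m := Nat.le_div_iff_mul_le (by omega) |>.mpr (by omega)
      have hmL : m < L := Nat.div_lt_self (by omega) (by omega)
      have hdiv : PySem.Int.floordiv (L : Int) 2 = (m : Int) := by
        exact_mod_cast PySem.Int.floordiv_natCast L 2
      have hizq : PySem.List.slice vec (some ((0:Nat) : Int)) (some ((m : Nat) : Int)) = vec.take m := by
        rw [PySem.List.slice_natCast]; simp
      have hder : PySem.List.slice vec (some ((m : Nat) : Int)) (some ((L : Nat) : Int)) = vec.drop m := by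
        rw [PySem.List.slice_natCast]
        exact List.take_of_length_le (by simp [← hL])
      have hlenI : (vec.take m).length = m := by simp [← hL]; omega
      have hlenD : (vec.drop m).length = L - m := by simp [← hL]
      have hIzqNe : vec.take m ≠ [] := List.length_pos_iff.mp (by omega)
      have hDerNe : vec.drop m ≠ [] := List.length_pos_iff.mp (by omega)
      have recI := ih (vec.take m) hIzqNe (by omega)
      have recD := ih (vec.drop m) hDerNe (by omega)
      rw [hlenI] at recI
      rw [hlenD] at recD
      have hnd : (L : Int) - (m : Int) = ((L - m : Nat) : Int) := by omega
      have hsplit := List.findIdx?_append (xs := vec.take m) (ys := vec.drop m) (p := (· == 0))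
      rw [List.take_append_drop] at hsplit
      show pvFindA (fuel + 1) vec (L : Int) = _
      rw [pvFindA]
      simp only [← hL, if_neg h1, hdiv]
      rw [show ((0:Int) = ((0:Nat):Int)) by norm_num] at *
      rw [hizq, hder, hnd, recI, recD, hsplit, hlenI]
      cases hI : (vec.take m).findIdx? (· == 0) with
      | some k =>
        have hk : ((k : Int)) ≠ -1 := by omega
        simp [hk]
      | none =>
        cases hD : (vec.drop m).findIdx? (· == 0) with
        | some k =>
          have hk : ((k : Int)) ≠ -1 := by omega
          simp [hk]
        | none => simp

-- The top call with 2 ≤ k ≤ len(vec): one unrolling makes both slices exact (no clamping),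
-- so both children satisfy the n = len invariant, and A scans exactly vec[:k].
theorem pvFindA_take (fuel : Nat) (vec : List Int) (k : Nat)
    (h2 : 2 ≤ k) (hk : k ≤ vec.length) (hf : vec.length + 1 ≤ fuel) :
    pvFindA fuel vec (k : Int) = (match (vec.take k).findIdx? (· == 0) with
      | some j => (j : Int)
      | none => -1) := by
  obtain ⟨f, rfl⟩ : ∃ f, fuel = f + 1 := ⟨fuel - 1, by omega⟩
  have h1 : vec.length ≠ 1 := by omega
  set m := k / 2 with hm
  have hm1 : 1 ≤ m := Nat.le_div_iff_mul_le (by omega) |>.mpr (by omega)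
  have hmk : m < k := Nat.div_lt_self (by omega) (by omega)
  have hdiv : PySem.Int.floordiv (k : Int) 2 = (m : Int) := by
    exact_mod_cast PySem.Int.floordiv_natCast k 2
  have hizq : PySem.List.slice vec (some ((0:Nat) : Int)) (some ((m : Nat) : Int)) = vec.take m := by
    rw [PySem.List.slice_natCast]; simp
  have hder : PySem.List.slice vec (some ((m : Nat) : Int)) (some ((k : Nat) : Int)) =
      (vec.drop m).take (k - m) := by
    rw [PySem.List.slice_natCast]
  have hlenI : (vec.take m).length = m := by simp; omega
  have hlenD : ((vec.drop m).take (k - m)).length = k - m := by simp; omega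
  have hIzqNe : vec.take m ≠ [] := List.length_pos_iff.mp (by omega)
  have hDerNe : (vec.drop m).take (k - m) ≠ [] := List.length_pos_iff.mp (by omega)
  have recI := pvFindA_eq f (vec.take m) hIzqNe (by omega)
  have recD := pvFindA_eq f ((vec.drop m).take (k - m)) hDerNe (by omega)
  rw [hlenI] at recI
  rw [hlenD] at recD
  have hnd : (k : Int) - (m : Int) = ((k - m : Nat) : Int) := by omega
  have hTk : vec.take k = vec.take m ++ (vec.drop m).take (k - m) := by
    conv_lhs => rw [show k = m + (k - m) by omega, List.take_add]
  have hsplit := List.findIdx?_append (xs := vec.take m) (ys := (vec.drop m).take (k - m)) (p := (· == 0))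
  rw [pvFindA]
  simp only [if_neg h1, hdiv]
  rw [show ((0:Int) = ((0:Nat):Int)) by norm_num] at *
  rw [hizq, hder, hnd, recI, recD, hTk, hsplit, hlenI]
  cases hI : (vec.take m).findIdx? (· == 0) with
  | some j =>
    have hj : ((j : Int)) ≠ -1 := by omega
    simp [hj]
  | none =>
    cases hD : ((vec.drop m).take (k - m)).findIdx? (· == 0) with
    | some j =>
      have hj : ((j : Int)) ≠ -1 := by omega
      simp [hj]
    | none => simp

-- Python [x][:n] : the whole list iff n ≥ 1, else empty.
theorem pvSliceSingleton (x n : Int) :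
    PySem.List.slice [x] none (some n) = if 1 ≤ n then [x] else [] := by
  simp only [PySem.List.slice, PySem.List.clampIdx]
  split_ifs <;> simp_all <;> omega

-- ===== VERDICT (by name: the statement is the Claim_ definition above) =====
theorem finder_zero_rec_spec : Claim_unchanged_finder_zero_rec := by
  intro vec n _hdom hpre hnd
  unfold D_finder_zero_rec at hnd
  push Not at hnd
  rcases hpre with h1 | ⟨h2, hle⟩
  · -- one-element vector
    obtain ⟨x, rfl⟩ : ∃ x, vec = [x] := List.length_eq_one_iff.mp h1
    by_cases hx : x = 0
    · by_cases hn1 : n = 1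
      · subst hn1; subst hx; decide
      · have hn0 : n = 0 := hnd h1 (by simp [hx]) hn1
        subst hn0; subst hx; decide
    · show pvFindA _ [x] n = pvScanB (PySem.List.slice [x] none (some n)) 0
      rw [pvSliceSingleton]
      split_ifs <;> simp [pvFindA, pvScanB, PySem.List.pyGetD, hx]
  · -- 2 ≤ n ≤ len(vec)
    obtain ⟨k, rfl⟩ : ∃ k : Nat, n = (k : Int) := ⟨n.toNat, (Int.toNat_of_nonneg (by omega)).symm⟩
    show pvFindA _ vec (k : Int) = pvScanB (PySem.List.slice vec none (some (k : Int))) 0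
    rw [pvFindA_take _ vec k (by omega) (by omega) (by omega),
        PySem.List.slice_to_natCast, pvScanB_eq]
    cases (vec.take k).findIdx? (· == 0) <;> simp

theorem finder_zero_rec_changed : Claim_changed_finder_zero_rec := by
  unfold Claim_changed_finder_zero_rec; decide

theorem finder_zero_rec_tight : Claim_exact_finder_zero_rec := by
  intro vec n _hdom _hpre hd
  obtain ⟨h1, hz, hn1, hn0⟩ := hd
  obtain ⟨x, rfl⟩ : ∃ x, vec = [x] := List.length_eq_one_iff.mp h1
  simp only [List.headI] at hz
  subst hz
  show pvFindA _ [0] n ≠ pvScanB (PySem.List.slice [0] none (some n)) 0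
  rw [pvSliceSingleton]
  split_ifs with h
  · simp [pvFindA, pvScanB, PySem.List.pyGetD]; omega
  · simp [pvFindA, pvScanB, PySem.List.pyGetD]; omega
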